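-- pv_equiv track=rewrite | github.com/enzet/Moire | moire/moire.py | preprocess_comments
-- ===== SOURCE A (Python) =====
-- from enum import Enum, auto
--
-- class Constant(Enum):
--     """Constants."""
--
--     COMMENT_BEGIN = "/*"
--     COMMENT_END = "*/"
--     TAG_MARKER = "\\"
--     ARGUMENT_START = "{"
--     ARGUMENT_END = "}"
--     PARAGRAPH_DELIMITER = "\n\n"
--
-- def preprocess_comments(text: str) -> str:
--     """Text to text processing: comments removing."""
--
--     preprocessed: str = ""
--     adding: bool = True
--     i: int = 0
--     while i < len(text):
--         if (
--             text[i : i + len(Constant.COMMENT_BEGIN.value)]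
--             == Constant.COMMENT_BEGIN.value
--         ):
--             adding = False
--             i += 1
--         elif (
--             text[i : i + len(Constant.COMMENT_END.value)]
--             == Constant.COMMENT_END.value
--         ):
--             adding = True
--             i += 1
--         elif adding:
--             preprocessed += text[i]
--         i += 1
--     return preprocessed
-- ===== SOURCE B (Python) =====
-- def preprocess_comments(text: str) -> str:
--     """Text to text processing: comments removing."""
--     parts = []
--     adding = True
--     i = 0
--     while True:
--         begin = text.find("/*", i)
--         end = text.find("*/", i)
--         if begin == -1 and end == -1:
--             if adding:
--                 parts.append(text[i:])
--             break
--         if begin != -1 and (end == -1 or begin < end):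
--             pos, new_adding = begin, False
--         else:
--             pos, new_adding = end, True
--         if adding:
--             parts.append(text[i:pos])
--         adding = new_adding
--         i = pos + 2
--     return "".join(parts)
-- ===== Notes on version B (the rewrite author's own statement) =====
-- stated objective: faster
-- what changed: Replaced A's per-character scan with quadratic string concatenation by a marker-search loop that jumps with find() to the nearest comment-begin or comment-end marker, appends whole segments to a list, and joins once at the end.
import Mathlib
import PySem

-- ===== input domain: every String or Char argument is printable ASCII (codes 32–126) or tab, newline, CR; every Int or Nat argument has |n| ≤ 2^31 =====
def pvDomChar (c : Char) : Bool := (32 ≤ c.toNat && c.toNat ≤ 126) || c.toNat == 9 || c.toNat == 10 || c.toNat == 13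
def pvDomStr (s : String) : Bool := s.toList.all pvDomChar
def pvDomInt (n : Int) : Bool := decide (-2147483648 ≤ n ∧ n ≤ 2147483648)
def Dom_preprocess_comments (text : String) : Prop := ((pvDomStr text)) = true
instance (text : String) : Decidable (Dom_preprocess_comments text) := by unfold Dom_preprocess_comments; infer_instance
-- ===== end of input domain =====

-- B replaces A's per-character scan by a marker-search loop (jump to the nearest "/*" or "*/" and
-- copy or skip the whole segment at once); objective: alternative decomposition, same exact output.

-- ===== PORT A =====
-- A scans one character at a time: on "/*" set adding := false and advance 2;
-- on "*/" set adding := true and advance 2; otherwise copy the char when adding, advance 1.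
-- (A one-character tail never equals a two-character marker, so it falls to the copy branch.)
def pvA_loop : List Char → Bool → List Char
  | [], _ => []
  | [c], adding => if adding then [c] else []
  | c :: d :: rest, adding =>
      if c = '/' ∧ d = '*' then pvA_loop rest false
      else if c = '*' ∧ d = '/' then pvA_loop rest true
      else if adding then c :: pvA_loop (d :: rest) adding
      else pvA_loop (d :: rest) adding

def preprocess_comments (text : String) : String :=
  String.mk (pvA_loop text.toList true)

-- ===== PORT B =====
-- text.find(pat, i) for a two-character pattern, as an Option-valued index (none = -1).
def pvFind2 (a b : Char) : List Char → Option Nat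
  | c :: d :: rest =>
      if c = a ∧ d = b then some 0
      else (pvFind2 a b (d :: rest)).map (· + 1)
  | _ => none

-- the nearest of the two markers from the current position: (position, is it "/*")
def pvNearest (l : List Char) : Option (Nat × Bool) :=
  match pvFind2 '/' '*' l, pvFind2 '*' '/' l with
  | none, none => none
  | some p, none => some (p, true)
  | none, some q => some (q, false)
  | some p, some q => if p < q then some (p, true) else some (q, false)

-- a found marker fits inside the list (used for termination of the search loop)
theorem pvFind2_bound (a b : Char) : ∀ (l : List Char) (p : Nat),
    pvFind2 a b l = some p → p + 2 ≤ l.length := by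
  intro l
  induction l with
  | nil => intro p h; simp [pvFind2] at h
  | cons c tl ih =>
    cases tl with
    | nil => intro p h; simp [pvFind2] at h
    | cons d rest =>
      intro p h
      by_cases hm : c = a ∧ d = b
      · simp [pvFind2, hm] at h
        simp only [List.length_cons]
        omega
      · simp [pvFind2, hm] at h
        obtain ⟨q, hq, rfl⟩ := h
        have := ih q hq
        simp only [List.length_cons] at this ⊢
        omega

theorem pvNearest_bound (l : List Char) (p : Nat) (b : Bool)
    (h : pvNearest l = some (p, b)) : p + 2 ≤ l.length := by
  unfold pvNearest at h
  cases h1 : pvFind2 '/' '*' l <;> cases h2 : pvFind2 '*' '/' l <;> rw [h1, h2] at h <;>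
    simp at h
  · exact h.1 ▸ pvFind2_bound _ _ _ _ h2
  · exact h.1 ▸ pvFind2_bound _ _ _ _ h1
  · split at h <;> simp at h
    · exact h.1 ▸ pvFind2_bound _ _ _ _ h1
    · exact h.1 ▸ pvFind2_bound _ _ _ _ h2

-- B's loop: jump straight to the nearest marker, copying the skipped segment when adding.
def pvB_loop (l : List Char) (adding : Bool) : List Char :=
  match h : pvNearest l with
  | none => if adding then l else []
  | some (pos, isBegin) =>
      (if adding then l.take pos else []) ++ pvB_loop (l.drop (pos + 2)) (!isBegin)
termination_by l.length
decreasing_by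
  have := pvNearest_bound l pos isBegin h
  simp
  omega

def preprocess_comments_alt (text : String) : String :=
  String.mk (pvB_loop text.toList true)

-- ===== PRECONDITION & SPEC =====
def Spec_preprocess_comments (text : String) (out : String) : Prop := out = preprocess_comments_alt text
instance (text : String) (out : String) : Decidable (Spec_preprocess_comments text out) := by unfold Spec_preprocess_comments; infer_instance

-- ===== CLAIM (what is proved, stated in full; the proofs are below) =====
def Claim_equal_preprocess_comments : Prop := ∀ (text : String), Dom_preprocess_comments text → Spec_preprocess_comments text (preprocess_comments text)

-- ===== LEMMAS AND PROOFS =====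

theorem pvNearest_nil : pvNearest [] = none := by simp [pvNearest, pvFind2]

theorem pvNearest_one (c : Char) : pvNearest [c] = none := by simp [pvNearest, pvFind2]

theorem pvB_none (l : List Char) (h : pvNearest l = none) (adding : Bool) :
    pvB_loop l adding = if adding then l else [] := by
  rw [pvB_loop]
  split <;> simp_all

theorem pvB_some (l : List Char) (p : Nat) (b : Bool)
    (h : pvNearest l = some (p, b)) (adding : Bool) :
    pvB_loop l adding
      = (if adding then l.take p else []) ++ pvB_loop (l.drop (p + 2)) (!b) := by
  rw [pvB_loop]
  split <;> simp_all

theorem pvNearest_begin (rest : List Char) :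
    pvNearest ('/' :: '*' :: rest) = some (0, true) := by
  have h1 : pvFind2 '/' '*' ('/' :: '*' :: rest) = some 0 := by simp [pvFind2]
  have h2 : pvFind2 '*' '/' ('/' :: '*' :: rest)
      = (pvFind2 '*' '/' ('*' :: rest)).map (· + 1) := by
    simp [pvFind2]
  unfold pvNearest
  rw [h1, h2]
  cases pvFind2 '*' '/' ('*' :: rest) <;> simp

theorem pvNearest_end (rest : List Char) :
    pvNearest ('*' :: '/' :: rest) = some (0, false) := by
  have h2 : pvFind2 '*' '/' ('*' :: '/' :: rest) = some 0 := by simp [pvFind2]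
  have h1 : pvFind2 '/' '*' ('*' :: '/' :: rest)
      = (pvFind2 '/' '*' ('/' :: rest)).map (· + 1) := by
    simp [pvFind2]
  unfold pvNearest
  rw [h1, h2]
  cases pvFind2 '/' '*' ('/' :: rest) <;> simp

theorem pvNearest_cons (c d : Char) (rest : List Char)
    (h1 : ¬(c = '/' ∧ d = '*')) (h2 : ¬(c = '*' ∧ d = '/')) :
    pvNearest (c :: d :: rest)
      = (pvNearest (d :: rest)).map (fun pb => (pb.1 + 1, pb.2)) := by
  have e1 : pvFind2 '/' '*' (c :: d :: rest)
      = (pvFind2 '/' '*' (d :: rest)).map (· + 1) := by simp [pvFind2, h1]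
  have e2 : pvFind2 '*' '/' (c :: d :: rest)
      = (pvFind2 '*' '/' (d :: rest)).map (· + 1) := by simp [pvFind2, h2]
  unfold pvNearest
  rw [e1, e2]
  cases pvFind2 '/' '*' (d :: rest) <;> cases pvFind2 '*' '/' (d :: rest) <;> simp
  split <;> simp

theorem pvLoop_eq : ∀ (n : Nat) (l : List Char), l.length ≤ n →
    ∀ (adding : Bool), pvA_loop l adding = pvB_loop l adding := by
  intro n
  induction n with
  | zero =>
    intro l hl adding
    have : l = [] := by cases l <;> simp_all
    subst this
    rw [pvB_none _ pvNearest_nil]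
    cases adding <;> simp [pvA_loop]
  | succ n ih =>
    intro l hl adding
    match l with
    | [] =>
      rw [pvB_none _ pvNearest_nil]
      cases adding <;> simp [pvA_loop]
    | [c] =>
      rw [pvB_none _ (pvNearest_one c)]
      simp [pvA_loop]
    | c :: d :: rest =>
      by_cases hb : c = '/' ∧ d = '*'
      · obtain ⟨rfl, rfl⟩ := hb
        rw [pvB_some _ _ _ (pvNearest_begin rest)]
        simp [pvA_loop]
        exact ih rest (by simp at hl; omega) false
      · by_cases he : c = '*' ∧ d = '/'
        · obtain ⟨rfl, rfl⟩ := he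
          rw [pvB_some _ _ _ (pvNearest_end rest)]
          simp [pvA_loop]
          exact ih rest (by simp at hl; omega) true
        · have hA : pvA_loop (c :: d :: rest) adding
              = (if adding then [c] else []) ++ pvA_loop (d :: rest) adding := by
            cases adding <;> simp [pvA_loop, hb, he]
          rw [hA, ih (d :: rest) (by simp at hl ⊢; omega) adding]
          cases hn : pvNearest (d :: rest) with
          | none =>
            have h0 : pvNearest (c :: d :: rest) = none := by
              rw [pvNearest_cons c d rest hb he, hn]; rfl
            rw [pvB_none _ h0, pvB_none _ hn]
            cases adding <;> simp
          | some pb =>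
            obtain ⟨p, b⟩ := pb
            have h0 : pvNearest (c :: d :: rest) = some (p + 1, b) := by
              rw [pvNearest_cons c d rest hb he, hn]; rfl
            rw [pvB_some _ _ _ h0, pvB_some _ _ _ hn]
            have hd : p + 1 + 2 = (p + 2) + 1 := by omega
            rw [hd, List.drop_succ_cons, List.take_succ_cons]
            cases adding <;> simp

-- ===== VERDICT (by name: the statement is the Claim_ definition above) =====
theorem preprocess_comments_spec : Claim_equal_preprocess_comments := by
  intro text _
  unfold Spec_preprocess_comments preprocess_comments preprocess_comments_alt
  rw [pvLoop_eq text.toList.length text.toList (le_refl _) true]
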